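-- pv_equiv track=rewrite | github.com/rrwick/Verticall | verticall/view.py | check_hex_colour
-- ===== SOURCE A (Python) =====
-- def check_hex_colour(colour):
--     if len(colour) != 7:
--         return False
--     if colour[0] != '#':
--         return False
--     colour = colour.lower()
--     good_chars = {'0', '1', '2', '3', '4', '5', '6', '7', '8', '9', 'a', 'b', 'c', 'd', 'e', 'f'}
--     for i in range(1, 7):
--         if colour[i] not in good_chars:
--             return False
--     return True
-- ===== SOURCE B (Python) =====
-- import re
--
-- _HEX_COLOUR_RE = re.compile(r'#[0-9A-Fa-f]{6}')
--
-- def check_hex_colour(colour):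
--     return bool(_HEX_COLOUR_RE.fullmatch(colour))
-- ===== Notes on version B (the rewrite author's own statement) =====
-- stated objective: idiomatic
-- what changed: Replaces A's separate length check, first-character check, lowercasing and per-character set-membership loop with a single anchored regular-expression fullmatch against #[0-9A-Fa-f]{6}.
import Mathlib
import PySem

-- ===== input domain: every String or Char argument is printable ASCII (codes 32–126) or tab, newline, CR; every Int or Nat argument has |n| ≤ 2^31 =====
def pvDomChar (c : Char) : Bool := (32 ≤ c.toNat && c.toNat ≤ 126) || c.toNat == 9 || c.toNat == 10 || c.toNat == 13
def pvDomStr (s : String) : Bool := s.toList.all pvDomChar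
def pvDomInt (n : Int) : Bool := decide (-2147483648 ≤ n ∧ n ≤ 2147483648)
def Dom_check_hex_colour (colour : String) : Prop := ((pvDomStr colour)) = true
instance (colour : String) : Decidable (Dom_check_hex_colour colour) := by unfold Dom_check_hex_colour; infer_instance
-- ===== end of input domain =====

-- B replaces A's length check, '#'-check, lowercasing and set-membership loop with a single
-- anchored regex fullmatch against '#[0-9A-Fa-f]{6}' (ported as a structural pattern match). Idiomatic, same cost.


-- ===== PORT A =====
-- the set literal good_chars
def goodChars : PySem.Set Char :=
  PySem.Set.ofList ['0','1','2','3','4','5','6','7','8','9','a','b','c','d','e','f']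

def check_hex_colour (colour : String) : Bool :=
  if PySem.Str.len colour ≠ 7 then false
  else if PySem.Str.pyGet? colour 0 ≠ some '#' then false
  else
    -- colour = colour.lower(); the early-return loop over range(1, 7) is an `all`
    let lowered := PySem.Chars.lower colour.toList
    (PySem.List.pyRange 1 7 1).all (fun i =>
      goodChars.contains (PySem.List.pyGetD lowered i ' '))

-- ===== PORT B =====
-- the character class [0-9A-Fa-f] of B's regex
def isHexChar (c : Char) : Bool :=
  ('0' ≤ c && c ≤ '9') || ('A' ≤ c && c ≤ 'F') || ('a' ≤ c && c ≤ 'f')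

-- re.fullmatch(r'#[0-9A-Fa-f]{6}', colour): a '#' head followed by exactly six class characters
def check_hex_colour_alt (colour : String) : Bool :=
  match colour.toList with
  | c :: rest => c == '#' && rest.length == 6 && rest.all isHexChar
  | [] => false

-- ===== PRECONDITION & SPEC =====
def Spec_check_hex_colour (colour : String) (out : Bool) : Prop := out = check_hex_colour_alt colour
instance (colour : String) (out : Bool) : Decidable (Spec_check_hex_colour colour out) := by unfold Spec_check_hex_colour; infer_instance

-- ===== CLAIM (what is proved, stated in full; the proofs are below) =====
def Claim_equal_check_hex_colour : Prop := ∀ (colour : String), Dom_check_hex_colour colour → Spec_check_hex_colour colour (check_hex_colour colour)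

-- ===== LEMMAS AND PROOFS =====

-- per-character agreement of A's lowercase-then-set-membership test with B's regex class,
-- for every character below code point 127 (Dom guarantees this)
set_option maxRecDepth 8192 in
lemma char_agree : ∀ n : Nat, n < 127 →
    decide (PySem.Chars.lowerChar (Char.ofNat n) ∈ (goodChars : List Char)) = isHexChar (Char.ofNat n) := by
  decide

lemma char_agree' (c : Char) (h : pvDomChar c = true) :
    decide (PySem.Chars.lowerChar c ∈ (goodChars : List Char)) = isHexChar c := by
  have hlt : c.toNat < 127 := by
    simp only [pvDomChar, Bool.or_eq_true, Bool.and_eq_true, decide_eq_true_eq, beq_iff_eq] at h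
    omega
  have := char_agree c.toNat hlt
  simpa using this

theorem key (colour : String) (hd : Dom_check_hex_colour colour) :
    check_hex_colour colour = check_hex_colour_alt colour := by
  unfold Dom_check_hex_colour pvDomStr at hd
  unfold check_hex_colour check_hex_colour_alt
  have hr : PySem.List.pyRange 1 7 1 = [1, 2, 3, 4, 5, 6] := by decide
  rcases hl : colour.toList with _ | ⟨c0, rest⟩
  · simp [PySem.Str.len_eq, hl]
  · rw [hl] at hd
    simp only [List.all_cons, Bool.and_eq_true] at hd
    obtain ⟨h0, hdr⟩ := hd
    by_cases hc0 : c0 = '#'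
    · subst hc0
      rcases rest with _|⟨c1,rest⟩ <;> try (simp [PySem.Str.len_eq, hl]; done)
      rcases rest with _|⟨c2,rest⟩ <;> try (simp [PySem.Str.len_eq, hl]; done)
      rcases rest with _|⟨c3,rest⟩ <;> try (simp [PySem.Str.len_eq, hl]; done)
      rcases rest with _|⟨c4,rest⟩ <;> try (simp [PySem.Str.len_eq, hl]; done)
      rcases rest with _|⟨c5,rest⟩ <;> try (simp [PySem.Str.len_eq, hl]; done)
      rcases rest with _|⟨c6,rest⟩ <;> try (simp [PySem.Str.len_eq, hl]; done)
      rcases rest with _|⟨c7,rest⟩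
      · -- exactly seven characters starting with '#'
        simp only [List.all_cons, Bool.and_eq_true] at hdr
        obtain ⟨h1, h2, h3, h4, h5, h6, -⟩ := hdr
        have hlen : colour.length = 7 := by
          have := congrArg List.length hl
          simpa using this
        simp only [PySem.Str.len_eq, hl, hr, PySem.Chars.lower, List.map]
        norm_num [PySem.List.pyGetD, PySem.List.pyGet?, PySem.List.pyIdx?, hlen, hl,
              Int.toNat, List.getElem?_cons_zero, List.getElem?_cons_succ,
              char_agree' _ h1, char_agree' _ h2, char_agree' _ h3,
              char_agree' _ h4, char_agree' _ h5, char_agree' _ h6]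
      · simp [PySem.Str.len_eq, hl]
        intro h
        omega
    · -- first character is not '#': both sides are false
      by_cases hlen7 : rest.length = 6
      · simp [PySem.Str.len_eq, hl, PySem.Str.pyGet?, PySem.List.pyGet?, PySem.List.pyIdx?,
          hlen7, hc0]
      · simp [PySem.Str.len_eq, hl, hc0, hlen7]
-- ===== VERDICT (by name: the statement is the Claim_ definition above) =====
theorem check_hex_colour_spec : Claim_equal_check_hex_colour := by
  intro colour hd
  unfold Spec_check_hex_colour
  exact key colour hd
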